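-- pv_equiv track=rewrite | github.com/SuleymanovTahir/beauty-crm | backend/utils/email_service.py | is_fake_email
-- ===== SOURCE A (Python) =====
-- def is_fake_email(email: str) -> bool:
--     """
--     Проверяет, является ли email тестовым/фейковым
--     """
--     if not email:
--         return True
--
--     fake_domains = ['example.com', 'example.org', 'example.net', 'test.com', 'localhost']
--     email_lower = email.lower()
--
--     for domain in fake_domains:
--         if email_lower.endswith(f'@{domain}'):
--             return True
--
--     return False
-- ===== SOURCE B (Python) =====
-- FAKE_DOMAINS = {'example.com', 'example.org', 'example.net', 'test.com', 'localhost'}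
--
--
-- def is_fake_email(email: str) -> bool:
--     if not email:
--         return True
--     if '@' not in email:
--         return False
--     domain = email.lower().rsplit('@', 1)[1]
--     return domain in FAKE_DOMAINS
-- ===== Notes on version B (the rewrite author's own statement) =====
-- stated objective: idiomatic
-- what changed: Instead of scanning the email with five endswith suffix tests, B parses the domain once (the part after the last at-sign) and does a single set membership test against the fake-domain set.
import Mathlib
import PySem

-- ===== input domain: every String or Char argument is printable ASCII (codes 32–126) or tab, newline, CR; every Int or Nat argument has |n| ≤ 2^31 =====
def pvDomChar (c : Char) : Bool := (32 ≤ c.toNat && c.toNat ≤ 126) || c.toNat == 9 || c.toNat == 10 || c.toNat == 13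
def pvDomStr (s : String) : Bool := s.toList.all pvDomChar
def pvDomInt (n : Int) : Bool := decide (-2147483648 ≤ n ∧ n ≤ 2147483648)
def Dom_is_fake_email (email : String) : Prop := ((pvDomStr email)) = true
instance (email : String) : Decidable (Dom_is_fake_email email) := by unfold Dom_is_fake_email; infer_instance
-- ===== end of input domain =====

-- B parses the domain after the last '@' once and tests set membership,
-- instead of A's five endswith suffix scans; return values are identical.

-- ===== PORT A =====
-- the 'for domain in fake_domains: if …: return True' loop, with its early return
def isFakeLoopA (email_lower : String) : List String → Bool
  | [] => false
  | d :: rest =>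
      if PySem.Str.endswith email_lower ("@" ++ d) then true
      else isFakeLoopA email_lower rest

def is_fake_email (email : String) : Bool :=
  if email == "" then true
  else
    isFakeLoopA (PySem.Str.lower email)
      ["example.com", "example.org", "example.net", "test.com", "localhost"]

-- ===== PORT B =====
def fakeDomains : PySem.Set String :=
  PySem.Set.ofList ["example.com", "example.org", "example.net", "test.com", "localhost"]

def is_fake_email_alt (email : String) : Bool :=
  if email == "" then true
  else if PySem.Str.isIn "@" email = false then false
  else
    -- hand port of email.lower().rsplit('@', 1)[1]: the characters after the LAST '@';
    -- exact here because '@' ∈ email, so rsplit('@', 1) yields exactly two pieces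
    let domain :=
      String.ofList (((PySem.Chars.lower email.toList).reverse.takeWhile (· != '@')).reverse)
    fakeDomains.contains domain

-- ===== PRECONDITION & SPEC =====
def Spec_is_fake_email (email : String) (out : Bool) : Prop := out = is_fake_email_alt email
instance (email : String) (out : Bool) : Decidable (Spec_is_fake_email email out) := by unfold Spec_is_fake_email; infer_instance

-- ===== CLAIM (what is proved, stated in full; the proofs are below) =====
def Claim_equal_is_fake_email : Prop := ∀ (email : String), Dom_is_fake_email email → Spec_is_fake_email email (is_fake_email email)

-- ===== LEMMAS AND PROOFS =====

theorem takeWhile_all_append_cons {α : Type} (p : α → Bool) (xs : List α) (y : α)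
    (ys : List α) (hx : ∀ a ∈ xs, p a = true) (hy : p y = false) :
    (xs ++ y :: ys).takeWhile p = xs := by
  induction xs with
  | nil => simp [hy]
  | cons a t ih =>
      have ha : p a = true := hx a (by simp)
      simp only [List.cons_append, List.takeWhile_cons, ha, if_true]
      rw [ih (fun b hb => hx b (by simp [hb]))]

-- characterisation of A's per-domain test: the email ends with '@'+d iff it contains
-- an '@' and the segment after the LAST '@' is exactly d (for d containing no '@')
theorem endswith_at_eq (l d : List Char) (hd : '@' ∉ d) :
    PySem.Chars.endswith l ('@' :: d)
      = ('@' ∈ l && (l.reverse.takeWhile (· != '@')).reverse == d) := by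
  rw [Bool.eq_iff_iff, PySem.Chars.endswith_iff l ('@' :: d)]
  simp only [Bool.and_eq_true, decide_eq_true_eq, beq_iff_eq]
  constructor
  · rintro ⟨t, rfl⟩
    refine ⟨by simp, ?_⟩
    have hrev : (t ++ '@' :: d).reverse = d.reverse ++ '@' :: t.reverse := by simp
    rw [hrev, takeWhile_all_append_cons _ _ _ _
      (fun a ha => by
        have hmem : a ∈ d := List.mem_reverse.mp ha
        simp only [bne_iff_ne, ne_eq]
        intro hEq; exact hd (hEq ▸ hmem))
      (by simp)]
    simp
  · rintro ⟨hmem, hdom⟩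
    set p : Char → Bool := (· != '@') with hp
    have hsplit : l.reverse.takeWhile p ++ l.reverse.dropWhile p = l.reverse :=
      List.takeWhile_append_dropWhile
    have hne : l.reverse.dropWhile p ≠ [] := by
      intro hnil
      rw [hnil, List.append_nil] at hsplit
      have h1 : '@' ∈ l.reverse.takeWhile p := hsplit.symm ▸ List.mem_reverse.mpr hmem
      have h2 := List.mem_takeWhile_imp h1
      simp [hp] at h2
    obtain ⟨b, bs, hbs⟩ := List.exists_cons_of_ne_nil hne
    have hb : b = '@' := by
      have h3 := List.head_dropWhile_not p hne
      simp only [hbs] at h3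
      simp only [List.head_cons] at h3
      rw [hp] at h3
      simpa using h3
    have hl : l.reverse = l.reverse.takeWhile p ++ '@' :: bs := by
      rw [← hb, ← hbs]; exact hsplit.symm
    refine ⟨bs.reverse, ?_⟩
    have := congrArg List.reverse hl
    simp only [List.reverse_reverse, List.reverse_append, List.reverse_cons] at this
    rw [this, hdom]
    simp
-- lowering never creates or destroys an '@'
theorem mem_at_lower (cs : List Char) : '@' ∈ PySem.Chars.lower cs ↔ '@' ∈ cs := by
  simp only [PySem.Chars.lower, List.mem_map]
  constructor
  · rintro ⟨c, hc, hEq⟩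
    unfold PySem.Chars.lowerChar at hEq
    split at hEq
    · next hu =>
        exfalso
        simp only [PySem.Chars.isupper, Bool.and_eq_true, decide_eq_true_eq] at hu
        obtain ⟨hA, hZ⟩ := hu
        rw [Char.le_def, UInt32.le_iff_toNat_le] at hA hZ
        have hcv : c.val.toNat = c.toNat := rfl
        have hAv : ('A').val.toNat = 65 := by decide
        have hZv : ('Z').val.toNat = 90 := by decide
        have h64 : ('@').toNat = 64 := by decide
        have := congrArg Char.toNat hEq
        rw [Char.toNat_ofNat, if_pos (Or.inl (by omega : c.toNat + 32 < 0xd800))] at this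
        omega
    · exact hEq ▸ hc
  · intro hc
    exact ⟨'@', hc, by decide⟩

theorem ofList_eq_iff (d : List Char) (s : String) :
    (String.ofList d == s) = (d == s.toList) := by
  rcases h : (d == s.toList) with _ | _
  · simp only [beq_eq_false_iff_ne, ne_eq] at h ⊢
    intro hEq
    exact h (by rw [← hEq, String.toList_ofList])
  · simp only [beq_iff_eq] at h ⊢
    rw [h]
    exact String.ofList_toList

-- ===== VERDICT (by name: the statement is the Claim_ definition above) =====
theorem is_fake_email_spec : Claim_equal_is_fake_email := by
  intro email hdom
  unfold Spec_is_fake_email is_fake_email is_fake_email_alt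
  by_cases he : email == ""
  · simp [he]
  · simp only [he, Bool.false_eq_true, if_false]
    set l := PySem.Chars.lower email.toList with hl
    set D := (l.reverse.takeWhile (· != '@')).reverse with hD
    have hends : ∀ d : String, '@' ∉ d.toList →
        PySem.Str.endswith (PySem.Str.lower email) ("@" ++ d)
          = ('@' ∈ l && D == d.toList) := by
      intro d hd
      rw [PySem.Str.endswith_eq, PySem.Str.toList_lower, String.toList_append]
      have h1 : ("@" : String).toList = ['@'] := by decide
      rw [h1]
      exact endswith_at_eq l d.toList hd
    have hIn : PySem.Str.isIn "@" email = ('@' ∈ l : Bool) := by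
      rw [PySem.Str.isIn_eq]
      have h1 : ("@" : String).toList = ['@'] := by decide
      rw [h1]
      rcases hm : (decide ('@' ∈ email.toList)) with _ | _
      · simp only [decide_eq_false_iff_not] at hm
        have hni : ¬ ['@'] <:+: email.toList := by
          exact fun hin => hm ((List.singleton_infix_iff '@' email.toList).mp hin)
        have hf : PySem.Chars.isIn ['@'] email.toList = false := by
          rcases hval : PySem.Chars.isIn ['@'] email.toList with _ | _
          · rfl
          · exact absurd ((PySem.Chars.isIn_iff_infix ['@'] email.toList).mp hval) hni
        rw [hf]
        have : ¬ '@' ∈ l := fun hx => hm ((mem_at_lower email.toList).mp hx)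
        simp [this]
      · simp only [decide_eq_true_eq] at hm
        rw [(PySem.Chars.isIn_iff_infix ['@'] email.toList).mpr
          ((List.singleton_infix_iff '@' email.toList).mpr hm)]
        have : '@' ∈ l := (mem_at_lower email.toList).mpr hm
        simp [this]
    simp only [isFakeLoopA,
      hends "example.com" (by decide), hends "example.org" (by decide),
      hends "example.net" (by decide), hends "test.com" (by decide),
      hends "localhost" (by decide), hIn]
    rcases hm : (decide ('@' ∈ l)) with _ | _
    · simp
    · simp only [Bool.true_and, Bool.true_eq_false, if_false, fakeDomains]
      rw [PySem.Set.contains_eq_listContains]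
      have hset : PySem.Set.ofList
          ["example.com", "example.org", "example.net", "test.com", "localhost"]
          = (["example.com", "example.org", "example.net", "test.com", "localhost"] : List String) := by
        decide
      rw [hset]
      simp only [List.contains_cons, List.contains_nil, ofList_eq_iff, Bool.or_false]
      split_ifs with h1 h2 h3 h4 h5 <;> simp_all
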